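-- pv_equiv track=rewrite | github.com/RegentDmitry/LLM_Range_Tool | lib/buckets.py | full_house_pair
-- ===== SOURCE A (Python) =====
-- from itertools import combinations
--
-- def full_house_pair(hole_cards_values, board_values):
--     c3 = 0
--     c2 = 0
--
--     m2 = list(combinations(hole_cards_values, 2))
--     m3 = list(combinations(board_values, 3))
--
--     for m2_item in m2:
--         for m3_item in m3:
--             temp = list(m2_item) + list(m3_item)
--             dic = {}
--             for t in temp:
--                 if t in dic:
--                     dic[t] += 1
--                 else:
--                     dic[t] = 1
--
--             if len(dic) != 2:
--                 continue
--
--             first, last = dic.items()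
--
--             if not ((first[1] == 3 and last[1] == 2) or (first[1] == 2 and last[1] == 3)):
--                 continue
--
--             cc3 = first[0] if first[1] == 3 else last[0]
--             cc2 = first[0] if first[1] == 2 else last[0]
--
--             if cc3 > c3:
--                 c3 = cc3
--                 c2 = cc2
--
--             if cc3 == c3 and cc2 > c2:
--                 c2 = cc2
--
--     if c3 == 0:
--         return None
--
--     return c3, c2
-- ===== SOURCE B (Python) =====
-- def full_house_pair(hole_cards_values, board_values):
--     # Count-based search: tally hole and board values once, then test each
--     # ordered pair of distinct values (trips, pair) for feasibility by count
--     # arithmetic; return the lexicographically best feasible pair, else None.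
--     ch = {}
--     for v in hole_cards_values:
--         ch[v] = ch.get(v, 0) + 1
--     cb = {}
--     for v in board_values:
--         cb[v] = cb.get(v, 0) + 1
--     vals = list(ch) + list(cb)
--     best = None
--     for t in vals:
--         for p in vals:
--             if t == p:
--                 continue
--             ht, hp = ch.get(t, 0), ch.get(p, 0)
--             bt, bp = cb.get(t, 0), cb.get(p, 0)
--             ok = ((ht >= 2 and bt >= 1 and bp >= 2)
--                   or (hp >= 2 and bt >= 3)
--                   or (ht >= 1 and hp >= 1 and bt >= 2 and bp >= 1))
--             if ok and (best is None or t > best[0] or (t == best[0] and p > best[1])):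
--                 best = (t, p)
--     return best
-- ===== Notes on version B (the rewrite author's own statement) =====
-- stated objective: faster
-- what changed: Replaces A's enumeration of every (2-subset of hole, 3-subset of board) with one frequency count of each list followed by a feasibility test on each ordered pair of distinct values, returning the lexicographic maximum.
-- intended difference: On inputs where a full house is formable but every formable one has a non-positive trips value, A's 0-sentinel returns None while B returns the best (trips, pair), the intended result since None should mean no full house exists. — e.g. on full_house_pair([0, 0], [-1, -1, -1]): A returns none, B returns some (-1, 0)
import Mathlib
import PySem

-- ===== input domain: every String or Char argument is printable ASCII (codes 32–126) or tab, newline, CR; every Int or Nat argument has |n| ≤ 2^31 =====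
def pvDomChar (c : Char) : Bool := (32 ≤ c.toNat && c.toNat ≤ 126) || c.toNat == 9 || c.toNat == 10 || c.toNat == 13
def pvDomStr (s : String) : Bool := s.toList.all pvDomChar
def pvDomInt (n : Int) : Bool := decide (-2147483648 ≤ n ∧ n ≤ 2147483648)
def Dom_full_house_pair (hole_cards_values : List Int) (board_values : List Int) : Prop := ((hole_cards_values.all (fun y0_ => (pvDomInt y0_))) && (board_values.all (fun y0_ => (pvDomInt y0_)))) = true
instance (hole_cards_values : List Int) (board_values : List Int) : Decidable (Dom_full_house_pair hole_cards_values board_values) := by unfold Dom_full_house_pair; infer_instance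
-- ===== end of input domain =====

-- B replaces A's scan of all (hole-2-subset, board-3-subset) pairs by count arithmetic over
-- the distinct values (objective: faster); on inputs whose only full houses have a
-- non-positive trips value A's 0-sentinel returns None while B returns the best full house (D_ below).


-- ===== PORT A =====
-- itertools.combinations(l, k), in itertools' order
def pvCombs {α : Type} (k : Nat) (l : List α) : List (List α) :=
  match k, l with
  | 0, _ => [[]]
  | _ + 1, [] => []
  | k + 1, x :: xs => ((pvCombs k xs).map (fun t => x :: t)) ++ pvCombs (k + 1) xs

-- A's count dict of the five cards: for t in temp: if t in dic: dic[t] += 1 else: dic[t] = 1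
def candDic (temp : List Int) : PySem.Dict Int Int :=
  temp.foldl
    (fun d t => if d.contains t then d.insert t (d.getD t 0 + 1) else d.insert t 1)
    PySem.Dict.empty

-- the body of A's inner loop up to the two `continue`s: build the count dict of the five
-- cards, demand exactly two distinct values with counts {3,2}, return (trips, pair)
def pvCand5 (temp : List Int) : Option (Int × Int) :=
  match (candDic temp).items with
  | [(f0, f1), (l0, l1)] =>
    if ¬((f1 = 3 ∧ l1 = 2) ∨ (f1 = 2 ∧ l1 = 3)) then none
    else
      let cc3 := if f1 = 3 then f0 else l0
      let cc2 := if f1 = 2 then f0 else l0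
      some (cc3, cc2)
  | _ => none

def full_house_pair (hole_cards_values : List Int) (board_values : List Int) : Option (Int × Int) :=
  let m2 := pvCombs 2 hole_cards_values
  let m3 := pvCombs 3 board_values
  let st := m2.foldl (fun st m2i =>
    m3.foldl (fun st m3i =>
      match pvCand5 (m2i ++ m3i) with
      | none => st
      | some (cc3, cc2) =>
        let st1 := if cc3 > st.1 then (cc3, cc2) else st
        if cc3 = st1.1 ∧ cc2 > st1.2 then (st1.1, cc2) else st1) st)
    ((0 : Int), (0 : Int))
  if st.1 = 0 then none else some (st.1, st.2)

-- ===== PORT B =====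
-- the tally loop "for v in lst: d[v] = d.get(v, 0) + 1"
def cntDict (lst : List Int) : PySem.Dict Int Int :=
  lst.foldl (fun d v => d.insert v (d.getD v 0 + 1)) PySem.Dict.empty

-- the body of B's inner loop over p (ch/cb are the two tallies, t the candidate trips value)
def bStep (ch cb : PySem.Dict Int Int) (t : Int) (best : Option (Int × Int)) (p : Int) :
    Option (Int × Int) :=
  if t = p then best
  else
    let ht := ch.getD t 0
    let hp := ch.getD p 0
    let bt := cb.getD t 0
    let bp := cb.getD p 0
    let better : Bool := match best with
      | none => true
      | some m => decide (t > m.1 ∨ (t = m.1 ∧ p > m.2))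
    if ((2 ≤ ht ∧ 1 ≤ bt ∧ 2 ≤ bp) ∨ (2 ≤ hp ∧ 3 ≤ bt) ∨
          (1 ≤ ht ∧ 1 ≤ hp ∧ 2 ≤ bt ∧ 1 ≤ bp)) ∧ better = true
    then some (t, p) else best

def full_house_pair_alt (hole_cards_values : List Int) (board_values : List Int) : Option (Int × Int) :=
  let ch := cntDict hole_cards_values
  let cb := cntDict board_values
  let vals := ch.keys ++ cb.keys
  vals.foldl (fun best t => vals.foldl (bStep ch cb t) best) none

-- ===== PRECONDITION & SPEC =====
-- a full house (trips t, pair p) is formable from two hole cards and three board cards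
def FeasFH (h b : List Int) (t p : Int) : Prop :=
  t ≠ p ∧ ((2 ≤ h.count t ∧ 1 ≤ b.count t ∧ 2 ≤ b.count p) ∨
           (2 ≤ h.count p ∧ 3 ≤ b.count t) ∨
           (1 ≤ h.count t ∧ 1 ≤ h.count p ∧ 2 ≤ b.count t ∧ 1 ≤ b.count p))

-- On inputs where a full house is formable but every formable one has trips value ≤ 0, A's
-- 0-sentinel makes it return None, while B returns the lexicographically best (trips, pair),
-- which is the intended result (None should mean "no full house").
def D_full_house_pair (hole_cards_values : List Int) (board_values : List Int) : Prop :=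
  (∃ t ∈ hole_cards_values ++ board_values, ∃ p ∈ hole_cards_values ++ board_values,
      FeasFH hole_cards_values board_values t p) ∧
  (∀ t ∈ hole_cards_values ++ board_values, ∀ p ∈ hole_cards_values ++ board_values,
      FeasFH hole_cards_values board_values t p → t ≤ 0)
instance (hole_cards_values : List Int) (board_values : List Int) : Decidable (D_full_house_pair hole_cards_values board_values) := by
  unfold D_full_house_pair FeasFH; infer_instance

def Spec_full_house_pair (hole_cards_values : List Int) (board_values : List Int) (out : Option (Int × Int)) : Prop := ¬ D_full_house_pair hole_cards_values board_values → out = full_house_pair_alt hole_cards_values board_values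
instance (hole_cards_values : List Int) (board_values : List Int) (out : Option (Int × Int)) : Decidable (Spec_full_house_pair hole_cards_values board_values out) := by unfold Spec_full_house_pair; infer_instance

def pvDiffWitness_full_house_pair : List Int × List Int := ([0, 0], [-1, -1, -1])
def pvDiffWitnessOut_full_house_pair : (Option (Int × Int)) × (Option (Int × Int)) := (none, some (-1, 0))

-- ===== CLAIM (what is proved, stated in full; the proofs are below) =====
def Claim_unchanged_full_house_pair : Prop := ∀ (hole_cards_values : List Int) (board_values : List Int), Dom_full_house_pair hole_cards_values board_values → Spec_full_house_pair hole_cards_values board_values (full_house_pair hole_cards_values board_values)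
def Claim_changed_full_house_pair : Prop := Dom_full_house_pair (pvDiffWitness_full_house_pair.1) (pvDiffWitness_full_house_pair.2) ∧ D_full_house_pair (pvDiffWitness_full_house_pair.1) (pvDiffWitness_full_house_pair.2) ∧ full_house_pair (pvDiffWitness_full_house_pair.1) (pvDiffWitness_full_house_pair.2) = pvDiffWitnessOut_full_house_pair.1 ∧ full_house_pair_alt (pvDiffWitness_full_house_pair.1) (pvDiffWitness_full_house_pair.2) = pvDiffWitnessOut_full_house_pair.2 ∧ pvDiffWitnessOut_full_house_pair.1 ≠ pvDiffWitnessOut_full_house_pair.2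
def Claim_exact_full_house_pair : Prop := ∀ (hole_cards_values : List Int) (board_values : List Int), Dom_full_house_pair hole_cards_values board_values → D_full_house_pair hole_cards_values board_values → full_house_pair hole_cards_values board_values ≠ full_house_pair_alt hole_cards_values board_values

-- ===== LEMMAS AND PROOFS =====

-- lexicographic order on (trips, pair) and the "keep the better" update
def lexLt (a c : Int × Int) : Prop := a.1 < c.1 ∨ (a.1 = c.1 ∧ a.2 < c.2)
def lexUpd (a c : Int × Int) : Int × Int := if a.1 < c.1 ∨ (a.1 = c.1 ∧ a.2 < c.2) then c else a
def lexLe (a c : Int × Int) : Prop := a = c ∨ lexLt a c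

-- the list of all full-house candidates A's double loop inspects
def candList (h b : List Int) : List (Int × Int) :=
  (pvCombs 2 h).flatMap (fun m2 => (pvCombs 3 b).filterMap (fun m3 => pvCand5 (m2 ++ m3)))

lemma foldl_match_filterMap {β γ σ : Type} (f : β → Option γ) (g : σ → γ → σ) :
    ∀ (l : List β) (a : σ),
      l.foldl (fun st y => match f y with | none => st | some c => g st c) a
        = (l.filterMap f).foldl g a := by
  intro l
  induction l with
  | nil => intro a; rfl
  | cons x xs ih =>
    intro a
    simp only [List.foldl_cons, List.filterMap_cons]
    cases hf : f x with
    | none => simpa [hf] using ih a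
    | some c => simpa [hf] using ih (g a c)

lemma lexUpd_or (a c : Int × Int) : lexUpd a c = a ∨ lexUpd a c = c := by
  unfold lexUpd; split <;> simp

lemma lexLe_refl (a : Int × Int) : lexLe a a := Or.inl rfl

lemma lexLe_trans {a b c : Int × Int} (h1 : lexLe a b) (h2 : lexLe b c) : lexLe a c := by
  rcases a with ⟨a1, a2⟩; rcases b with ⟨b1, b2⟩; rcases c with ⟨c1, c2⟩
  simp only [lexLe, lexLt, Prod.mk.injEq] at *
  omega

lemma lexLe_upd_left (a c : Int × Int) : lexLe a (lexUpd a c) := by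
  unfold lexUpd; split
  · exact Or.inr (by assumption)
  · exact Or.inl rfl

lemma lexLe_upd_right (a c : Int × Int) : lexLe c (lexUpd a c) := by
  rcases a with ⟨a1, a2⟩; rcases c with ⟨c1, c2⟩
  unfold lexUpd; split
  · exact Or.inl rfl
  · simp only [lexLe, lexLt, Prod.mk.injEq] at *
    omega

lemma lexLe_antisymm {a c : Int × Int} (h1 : lexLe a c) (h2 : lexLe c a) : a = c := by
  rcases a with ⟨a1, a2⟩; rcases c with ⟨c1, c2⟩
  simp only [lexLe, lexLt, Prod.mk.injEq] at *
  rcases h1 with h | h <;> rcases h2 with h' | h' <;> omega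

lemma lexLe_fst {a c : Int × Int} (h : lexLe a c) : a.1 ≤ c.1 := by
  rcases a with ⟨a1, a2⟩; rcases c with ⟨c1, c2⟩
  simp only [lexLe, lexLt, Prod.mk.injEq] at h
  omega

lemma foldl_lexUpd_mem : ∀ (l : List (Int × Int)) (a : Int × Int), l.foldl lexUpd a ∈ a :: l := by
  intro l
  induction l with
  | nil => intro a; simp
  | cons c cs ih =>
    intro a
    rw [List.foldl_cons]
    have h2 := ih (lexUpd a c)
    rw [List.mem_cons] at h2 ⊢
    rcases h2 with h2 | h2
    · rcases lexUpd_or a c with h | h <;> rw [h] at h2 ⊢ <;> simp [h2]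
    · simp [h2]

lemma foldl_lexUpd_le : ∀ (l : List (Int × Int)) (a : Int × Int), ∀ x ∈ a :: l, lexLe x (l.foldl lexUpd a) := by
  intro l
  induction l with
  | nil => intro a x hx; simp at hx; subst hx; exact lexLe_refl _
  | cons c cs ih =>
    intro a x hx
    rw [List.foldl_cons]
    have hseed : ∀ y ∈ lexUpd a c :: cs, lexLe y (cs.foldl lexUpd (lexUpd a c)) := ih (lexUpd a c)
    have hup : lexLe (lexUpd a c) (cs.foldl lexUpd (lexUpd a c)) := hseed _ (by simp)
    rw [List.mem_cons, List.mem_cons] at hx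
    rcases hx with rfl | rfl | h
    · exact lexLe_trans (lexLe_upd_left x c) hup
    · exact lexLe_trans (lexLe_upd_right a x) hup
    · exact hseed _ (by simp [h])

lemma cand_dic_eq_counter (temp : List Int) :
    candDic temp = PySem.Dict.counter temp := by
  rw [candDic, ← PySem.Dict.foldl_insert_getD_add_one_eq_counter]
  congr 1
  funext d t
  by_cases hc : d.contains t
  · simp [hc]
  · simp only [Bool.not_eq_true] at hc
    simp [hc, PySem.Dict.getD_of_not_contains _ _ hc]

lemma nodup_two {L : List Int} {t p : Int} (htp : t ≠ p) (hnd : L.Nodup)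
    (hmem : ∀ x, x ∈ L ↔ (x = t ∨ x = p)) : L = [t, p] ∨ L = [p, t] := by
  match L with
  | [] => exact absurd ((hmem t).mpr (Or.inl rfl)) (by simp)
  | [a] =>
    exfalso
    have h1 := (hmem t).mpr (Or.inl rfl)
    have h2 := (hmem p).mpr (Or.inr rfl)
    simp at h1 h2
    exact htp (h1.trans h2.symm)
  | a :: b :: c :: rest =>
    exfalso
    simp only [List.nodup_cons, List.mem_cons] at hnd
    have ha := (hmem a).mp (by simp)
    have hb := (hmem b).mp (by simp)
    have hc := (hmem c).mp (by simp)
    rcases ha with rfl | rfl <;> rcases hb with rfl | rfl <;> rcases hc with rfl | rfl <;> tauto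
  | [a, b] =>
    have ha := (hmem a).mp (by simp)
    have hb := (hmem b).mp (by simp)
    have hab : a ≠ b := by simp at hnd; tauto
    rcases ha with rfl | rfl <;> rcases hb with rfl | rfl <;> tauto

lemma pvCand5_eq_some {temp : List Int} {t p : Int} (h : pvCand5 temp = some (t, p)) :
    t ≠ p ∧ temp.count t = 3 ∧ temp.count p = 2 ∧ ∀ x ∈ temp, x = t ∨ x = p := by
  rw [pvCand5, cand_dic_eq_counter, PySem.Dict.items_counter] at h
  rcases hS : PySem.Set.ofList temp with _ | ⟨k1, _ | ⟨k2, _ | ⟨k3, S'⟩⟩⟩ <;> rw [hS] at h <;>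
    simp only [List.map_cons, List.map_nil] at h
  · exact absurd h (by simp)
  · exact absurd h (by simp)
  case cons.cons.cons => exact absurd h (by simp)
  -- two-element case
  have hnd : (PySem.Set.ofList temp).Nodup := PySem.Set.nodup_ofList temp
  rw [hS] at hnd
  have hk : k1 ≠ k2 := by simp at hnd; tauto
  have hmemS : ∀ x, x ∈ temp ↔ (x = k1 ∨ x = k2) := by
    intro x
    rw [← PySem.Set.mem_ofList (xs := temp), hS]; simp
  by_cases hcase : ((temp.count k1 : Int) = 3 ∧ (temp.count k2 : Int) = 2) ∨
      ((temp.count k1 : Int) = 2 ∧ (temp.count k2 : Int) = 3)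
  · rw [if_neg (not_not_intro hcase)] at h
    rcases hcase with ⟨h1, h2⟩ | ⟨h1, h2⟩
    · rw [if_pos h1, if_neg (by omega)] at h
      simp only [Option.some.injEq, Prod.mk.injEq] at h
      obtain ⟨rfl, rfl⟩ := h
      refine ⟨hk, by omega, by omega, fun x hx => (hmemS x).mp hx⟩
    · rw [if_neg (by omega), if_pos h1] at h
      simp only [Option.some.injEq, Prod.mk.injEq] at h
      obtain ⟨rfl, rfl⟩ := h
      refine ⟨hk.symm, by omega, by omega, fun x hx => ((hmemS x).mp hx).symm⟩
  · rw [if_pos hcase] at h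
    exact absurd h (by simp)

lemma pvCand5_of_perm {temp : List Int} {t p : Int} (hperm : temp.Perm [t, t, t, p, p])
    (htp : t ≠ p) : pvCand5 temp = some (t, p) := by
  have hct : temp.count t = 3 := by
    rw [hperm.count_eq]; simp [Ne.symm htp]
  have hcp : temp.count p = 2 := by
    rw [hperm.count_eq]; simp [htp]
  have hmem : ∀ x, x ∈ PySem.Set.ofList temp ↔ (x = t ∨ x = p) := by
    intro x
    rw [PySem.Set.mem_ofList, hperm.mem_iff]; simp
  have hS := nodup_two htp (PySem.Set.nodup_ofList temp) hmem
  rw [pvCand5, cand_dic_eq_counter, PySem.Dict.items_counter]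
  rcases hS with hS | hS <;> rw [hS] <;> simp [hct, hcp]

lemma mem_pvCombs {α : Type} : ∀ (l : List α) (k : Nat) (l' : List α),
    l' ∈ pvCombs k l ↔ (l'.Sublist l ∧ l'.length = k) := by
  intro l
  induction l with
  | nil =>
    intro k l'
    cases k with
    | zero => simp [pvCombs, List.length_eq_zero_iff]
    | succ k =>
      simp only [pvCombs, List.not_mem_nil, false_iff]
      rintro ⟨hs, hl⟩
      rw [List.sublist_nil] at hs
      subst hs
      simp at hl
  | cons x xs ih =>
    intro k l'
    cases k with
    | zero =>
      simp only [pvCombs, List.mem_singleton]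
      constructor
      · rintro rfl; exact ⟨List.nil_sublist _, rfl⟩
      · rintro ⟨_, hl⟩; exact List.length_eq_zero_iff.mp hl
    | succ k =>
      simp only [pvCombs, List.mem_append, List.mem_map, ih]
      rw [List.sublist_cons_iff]
      constructor
      · rintro (⟨t, ⟨hs, hl⟩, rfl⟩ | ⟨hs, hl⟩)
        · exact ⟨Or.inr ⟨t, rfl, hs⟩, by simp [hl]⟩
        · exact ⟨Or.inl hs, hl⟩
      · rintro ⟨hs | ⟨r, rfl, hr⟩, hl⟩
        · exact Or.inr ⟨hs, hl⟩
        · exact Or.inl ⟨r, ⟨hr, by simpa using hl⟩, rfl⟩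

lemma count_pair {L : List Int} {t p : Int} (htp : t ≠ p)
    (hm : ∀ x ∈ L, x = t ∨ x = p) : L.count t + L.count p = L.length := by
  induction L with
  | nil => simp
  | cons a L ih =>
    have ha := hm a (by simp)
    have ih' := ih (fun x hx => hm x (by simp [hx]))
    rcases ha with rfl | rfl <;> simp [Ne.symm htp, htp] <;> omega

lemma mem_candList {h b : List Int} {t p : Int} :
    (t, p) ∈ candList h b ↔ FeasFH h b t p := by
  simp only [candList, List.mem_flatMap, List.mem_filterMap]
  constructor
  · rintro ⟨m2, hm2, m3, hm3, hc⟩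
    rw [mem_pvCombs] at hm2 hm3
    obtain ⟨hs2, hl2⟩ := hm2
    obtain ⟨hs3, hl3⟩ := hm3
    obtain ⟨htp, hct, hcp, hmem⟩ := pvCand5_eq_some hc
    rw [List.count_append] at hct hcp
    have hm2t : m2.count t + m2.count p = 2 := by
      rw [← hl2]; exact count_pair htp (fun x hx => hmem x (by simp [hx]))
    have hm3t : m3.count t + m3.count p = 3 := by
      rw [← hl3]; exact count_pair htp (fun x hx => hmem x (by simp [hx]))
    have h1 := hs2.count_le t
    have h2 := hs2.count_le p
    have h3 := hs3.count_le t
    have h4 := hs3.count_le p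
    exact ⟨htp, by omega⟩
  · rintro ⟨htp, hd⟩
    have build : ∀ (pat2 pat3 : List Int), pat2.Subperm h → pat3.Subperm b →
        pat2.length = 2 → pat3.length = 3 → (pat2 ++ pat3).Perm [t, t, t, p, p] →
        ∃ m2, (m2 ∈ pvCombs 2 h) ∧ ∃ m3, m3 ∈ pvCombs 3 b ∧ pvCand5 (m2 ++ m3) = some (t, p) := by
      rintro pat2 pat3 ⟨l2, hp2, hs2⟩ ⟨l3, hp3, hs3⟩ hlen2 hlen3 hper
      refine ⟨l2, (mem_pvCombs _ _ _).mpr ⟨hs2, by rw [hp2.length_eq, hlen2]⟩,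
              l3, (mem_pvCombs _ _ _).mpr ⟨hs3, by rw [hp3.length_eq, hlen3]⟩, ?_⟩
      exact pvCand5_of_perm (((hp2.append hp3)).trans hper) htp
    rcases hd with ⟨ha, hb1, hb2⟩ | ⟨ha, hb1⟩ | ⟨ha1, ha2, hb1, hb2⟩
    · refine build [t, t] [t, p, p] ?_ ?_ rfl rfl ?_
      · refine List.subperm_ext_iff.mpr ?_
        intro x hx; simp at hx; subst hx; simp [List.count_cons]; omega
      · refine List.subperm_ext_iff.mpr ?_
        intro x hx
        simp at hx
        rcases hx with rfl | rfl <;> simp [List.count_cons] <;>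
          first | omega | (split_ifs <;> omega)
      · exact List.Perm.refl _
    · refine build [p, p] [t, t, t] ?_ ?_ rfl rfl ?_
      · refine List.subperm_ext_iff.mpr ?_
        intro x hx; simp at hx; subst hx; simp [List.count_cons]; omega
      · refine List.subperm_ext_iff.mpr ?_
        intro x hx; simp at hx; subst hx; simp [List.count_cons]; omega
      · refine List.perm_iff_count.mpr ?_
        intro x; simp [List.count_cons]; split_ifs <;> omega
    · refine build [t, p] [t, t, p] ?_ ?_ rfl rfl ?_
      · refine List.subperm_ext_iff.mpr ?_
        intro x hx
        simp at hx
        rcases hx with rfl | rfl <;> simp [List.count_cons] <;>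
          first | omega | (split_ifs <;> omega)
      · refine List.subperm_ext_iff.mpr ?_
        intro x hx
        simp at hx
        rcases hx with rfl | rfl <;> simp [List.count_cons] <;>
          first | omega | (split_ifs <;> omega)
      · refine List.perm_iff_count.mpr ?_
        intro x; simp [List.count_cons]; split_ifs <;> omega

-- ----- A's fold equals the lexicographic-max fold over candList -----

lemma A_step_eq (st c : Int × Int) :
    (let st1 := if c.1 > st.1 then (c.1, c.2) else st
     if c.1 = st1.1 ∧ c.2 > st1.2 then (st1.1, c.2) else st1) = lexUpd st c := by
  rcases st with ⟨s1, s2⟩; rcases c with ⟨c1, c2⟩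
  show (if c1 = (if c1 > s1 then ((c1, c2) : Int × Int) else (s1, s2)).1 ∧
          c2 > (if c1 > s1 then ((c1, c2) : Int × Int) else (s1, s2)).2
        then ((if c1 > s1 then ((c1, c2) : Int × Int) else (s1, s2)).1, c2)
        else (if c1 > s1 then ((c1, c2) : Int × Int) else (s1, s2))) = lexUpd (s1, s2) (c1, c2)
  unfold lexUpd
  by_cases h1 : c1 > s1
  · rw [if_pos h1]
    rw [if_neg (by simp), if_pos (by exact Or.inl h1)]
  · rw [if_neg h1]
    by_cases h2 : c1 = (s1, s2).1 ∧ c2 > (s1, s2).2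
    · rw [if_pos h2, if_pos (by exact Or.inr ⟨h2.1.symm, h2.2⟩)]
      exact Prod.ext h2.left.symm rfl
    · rw [if_neg h2, if_neg ?_]
      rintro (hlt | ⟨he, hl⟩)
      · exact h1 hlt
      · exact h2 ⟨he.symm, hl⟩

lemma A_eq (h b : List Int) :
    full_house_pair h b =
      (if ((candList h b).foldl lexUpd (0, 0)).1 = 0 then none
       else some ((candList h b).foldl lexUpd (0, 0))) := by
  have hstep : ∀ (m2i : List Int) (st : Int × Int),
      (pvCombs 3 b).foldl (fun st m3i =>
        match pvCand5 (m2i ++ m3i) with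
        | none => st
        | some (cc3, cc2) =>
          let st1 := if cc3 > st.1 then (cc3, cc2) else st
          if cc3 = st1.1 ∧ cc2 > st1.2 then (st1.1, cc2) else st1) st
        = ((pvCombs 3 b).filterMap (fun m3 => pvCand5 (m2i ++ m3))).foldl lexUpd st := by
    intro m2i st
    rw [← foldl_match_filterMap (fun m3 => pvCand5 (m2i ++ m3)) lexUpd]
    congr 1
    funext st m3i
    cases hc : pvCand5 (m2i ++ m3i) with
    | none => simp
    | some c => rcases c with ⟨c3, c2⟩; exact A_step_eq st (c3, c2)
  rw [full_house_pair, candList, List.foldl_flatMap]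
  simp only [hstep]

-- ----- B's fold equals the max fold over the feasible pairs -----

def valsB (h b : List Int) : List Int := PySem.Set.ofList h ++ PySem.Set.ofList b

def feasb (h b : List Int) (c : Int × Int) : Bool :=
  decide (c.1 ≠ c.2 ∧ ((2 ≤ h.count c.1 ∧ 1 ≤ b.count c.1 ∧ 2 ≤ b.count c.2) ∨
    (2 ≤ h.count c.2 ∧ 3 ≤ b.count c.1) ∨
    (1 ≤ h.count c.1 ∧ 1 ≤ h.count c.2 ∧ 2 ≤ b.count c.1 ∧ 1 ≤ b.count c.2)))

lemma feasb_iff {h b : List Int} {c : Int × Int} :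
    feasb h b c = true ↔ FeasFH h b c.1 c.2 := by
  simp [feasb, FeasFH]

def goodPairs (h b : List Int) : List (Int × Int) :=
  ((valsB h b).flatMap (fun t => (valsB h b).map (fun p => (t, p)))).filter (feasb h b)

def optUpd (best : Option (Int × Int)) (c : Int × Int) : Option (Int × Int) :=
  match best with
  | none => some c
  | some m => if m.1 < c.1 ∨ (m.1 = c.1 ∧ m.2 < c.2) then some c else some m

lemma cntDict_eq (lst : List Int) : cntDict lst = PySem.Dict.counter lst :=
  PySem.Dict.foldl_insert_getD_add_one_eq_counter lst

lemma bStep_eq (h b : List Int) (t : Int) (best : Option (Int × Int)) (p : Int) :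
    bStep (PySem.Dict.counter h) (PySem.Dict.counter b) t best p =
      (if feasb h b (t, p) then optUpd best (t, p) else best) := by
  rw [bStep.eq_def]
  simp only [PySem.Dict.getD_counter]
  by_cases htp : t = p
  · have hfe : feasb h b (t, p) = false := by
      simp [feasb, htp]
    rw [if_pos htp, hfe]
    simp
  · rw [if_neg htp]
    have hiff : ((2 ≤ (h.count t : Int) ∧ 1 ≤ (b.count t : Int) ∧ 2 ≤ (b.count p : Int)) ∨
        (2 ≤ (h.count p : Int) ∧ 3 ≤ (b.count t : Int)) ∨
        (1 ≤ (h.count t : Int) ∧ 1 ≤ (h.count p : Int) ∧ 2 ≤ (b.count t : Int) ∧ 1 ≤ (b.count p : Int)))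
        ↔ feasb h b (t, p) = true := by
      rw [feasb_iff]
      unfold FeasFH
      dsimp only
      constructor
      · intro hc; exact ⟨htp, by omega⟩
      · rintro ⟨-, hc⟩; omega
    cases best with
    | none =>
      by_cases hf : feasb h b (t, p) = true
      · rw [if_pos ⟨hiff.mpr hf, rfl⟩, if_pos hf]
        rfl
      · rw [if_neg (fun hc => hf (hiff.mp hc.1)), if_neg hf]
    | some m =>
      by_cases hf : feasb h b (t, p) = true
      · rw [if_pos hf]
        by_cases hlt : m.1 < t ∨ (m.1 = t ∧ m.2 < p)
        · rw [if_pos ⟨hiff.mpr hf, decide_eq_true (by omega)⟩]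
          simp [optUpd, hlt]
        · rw [if_neg ?_]
          · simp [optUpd, hlt]
          · rintro ⟨-, hbet⟩
            simp only [decide_eq_true_eq] at hbet
            exact hlt (by omega)
      · rw [if_neg (fun hc => hf (hiff.mp hc.1)), if_neg hf]

lemma B_eq (h b : List Int) :
    full_house_pair_alt h b = (goodPairs h b).foldl optUpd none := by
  rw [full_house_pair_alt]
  simp only [cntDict_eq, PySem.Dict.keys_counter]
  have hstep : ∀ (t : Int) (best : Option (Int × Int)),
      (PySem.Set.ofList h ++ PySem.Set.ofList b).foldl
          (bStep (PySem.Dict.counter h) (PySem.Dict.counter b) t) best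
        = (((PySem.Set.ofList h ++ PySem.Set.ofList b).map (fun p => (t, p))).filter
            (feasb h b)).foldl optUpd best := by
    intro t best
    rw [List.foldl_filter, List.foldl_map]
    congr 1
    funext best p
    rw [bStep_eq]
  simp only [hstep]
  rw [goodPairs, List.filter_flatMap, List.foldl_flatMap]
  rfl

lemma optUpd_some (a c : Int × Int) : optUpd (some a) c = some (lexUpd a c) := by
  simp only [optUpd, lexUpd]
  split_ifs <;> rfl

lemma foldl_optUpd_some : ∀ (l : List (Int × Int)) (a : Int × Int),
    l.foldl optUpd (some a) = some (l.foldl lexUpd a) := by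
  intro l
  induction l with
  | nil => intro a; rfl
  | cons c cs ih =>
    intro a
    rw [List.foldl_cons, List.foldl_cons, optUpd_some, ih]

lemma mem_valsB {h b : List Int} {t : Int} : t ∈ valsB h b ↔ (t ∈ h ∨ t ∈ b) := by
  simp [valsB, PySem.Set.mem_ofList]

lemma Feas_mem {h b : List Int} {t p : Int} (hf : FeasFH h b t p) :
    (t ∈ h ∨ t ∈ b) ∧ (p ∈ h ∨ p ∈ b) := by
  obtain ⟨-, hd⟩ := hf
  rcases hd with ⟨h1, h2, h3⟩ | ⟨h1, h2⟩ | ⟨h1, h2, h3, h4⟩ <;>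
    constructor <;>
    first
      | exact Or.inl (List.count_pos_iff.mp (by omega))
      | exact Or.inr (List.count_pos_iff.mp (by omega))

lemma mem_goodPairs {h b : List Int} {c : Int × Int} :
    c ∈ goodPairs h b ↔ FeasFH h b c.1 c.2 := by
  rw [goodPairs, List.mem_filter, feasb_iff]
  constructor
  · exact fun hx => hx.2
  · intro hf
    refine ⟨?_, hf⟩
    simp only [List.mem_flatMap, List.mem_map]
    obtain ⟨h1, h2⟩ := Feas_mem hf
    exact ⟨c.1, mem_valsB.mpr h1, c.2, mem_valsB.mpr h2, rfl⟩

-- ===== final assembly =====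
lemma A_none_of_all_nonpos {h b : List Int}
    (hall : ∀ t ∈ h ++ b, ∀ p ∈ h ++ b, FeasFH h b t p → t ≤ 0) :
    ((candList h b).foldl lexUpd (0, 0)).1 = 0 := by
  obtain ⟨M, hM⟩ : ∃ M, (candList h b).foldl lexUpd (0, 0) = M := ⟨_, rfl⟩
  have hMmem := foldl_lexUpd_mem (candList h b) (0, 0)
  have h0 := lexLe_fst (foldl_lexUpd_le (candList h b) (0, 0) (0, 0) (List.mem_cons_self))
  rw [hM] at hMmem h0 ⊢
  dsimp only at h0
  rcases List.mem_cons.mp hMmem with he | hm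
  · rw [he]
  · have hMfeas : FeasFH h b M.1 M.2 := mem_candList.mp (by simpa using hm)
    obtain ⟨hm1, hm2⟩ := Feas_mem hMfeas
    have := hall M.1 (List.mem_append.mpr hm1) M.2 (List.mem_append.mpr hm2) hMfeas
    omega

-- ===== VERDICT (by name: the statements are the Claim_ definitions above) =====
theorem full_house_pair_spec : Claim_unchanged_full_house_pair := by
  intro h b _hdom
  unfold Spec_full_house_pair
  intro hnD
  rw [A_eq, B_eq]
  by_cases hex : ∃ t p, FeasFH h b t p
  · obtain ⟨t0, p0, hf0⟩ := hex
    have hne : ∃ t ∈ h ++ b, ∃ p ∈ h ++ b, FeasFH h b t p := by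
      obtain ⟨h1, h2⟩ := Feas_mem hf0
      exact ⟨t0, List.mem_append.mpr h1, p0, List.mem_append.mpr h2, hf0⟩
    have hpos : ∃ t p, FeasFH h b t p ∧ 0 < t := by
      by_contra hallc
      refine hnD ⟨hne, fun t _ p _ hf => ?_⟩
      by_contra hgt
      exact hallc ⟨t, p, hf, by omega⟩
    obtain ⟨t, p, hf, ht0⟩ := hpos
    obtain ⟨M, hM⟩ : ∃ M, (candList h b).foldl lexUpd (0, 0) = M := ⟨_, rfl⟩
    have hMmem := foldl_lexUpd_mem (candList h b) (0, 0)
    have hMle := foldl_lexUpd_le (candList h b) (0, 0)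
    rw [hM] at hMmem ⊢
    simp only [hM] at hMle
    have htpC : (t, p) ∈ candList h b := mem_candList.mpr hf
    have hM1 : 0 < M.1 := by
      have := lexLe_fst (hMle _ (List.mem_cons_of_mem _ htpC))
      dsimp only at this
      omega
    have hMC : M ∈ candList h b := by
      rcases List.mem_cons.mp hMmem with he | hm
      · rw [he] at hM1; norm_num at hM1
      · exact hm
    have hMfeas : FeasFH h b M.1 M.2 := mem_candList.mp (by simpa using hMC)
    have hMG : M ∈ goodPairs h b := mem_goodPairs.mpr hMfeas
    rw [if_neg (by omega)]
    rcases hGP : goodPairs h b with _ | ⟨c, rest⟩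
    · rw [hGP] at hMG; simp at hMG
    · rw [List.foldl_cons]
      have hini : optUpd none c = some c := rfl
      rw [hini, foldl_optUpd_some]
      have hmmem : rest.foldl lexUpd c ∈ c :: rest := foldl_lexUpd_mem rest c
      have hmG : rest.foldl lexUpd c ∈ goodPairs h b := by rw [hGP]; exact hmmem
      have hmfeas := mem_goodPairs.mp hmG
      have hmC : rest.foldl lexUpd c ∈ candList h b := by
        have := mem_candList.mpr hmfeas
        simpa using this
      have h1 : lexLe M (rest.foldl lexUpd c) := by
        rw [hGP] at hMG
        exact foldl_lexUpd_le rest c _ hMG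
      have h2 : lexLe (rest.foldl lexUpd c) M := hMle _ (List.mem_cons_of_mem _ hmC)
      rw [lexLe_antisymm h1 h2]
  · have hC : candList h b = [] := by
      rw [List.eq_nil_iff_forall_not_mem]
      rintro ⟨t, p⟩ hc
      exact hex ⟨t, p, mem_candList.mp hc⟩
    have hG : goodPairs h b = [] := by
      rw [List.eq_nil_iff_forall_not_mem]
      intro c hc
      exact hex ⟨c.1, c.2, mem_goodPairs.mp hc⟩
    rw [hC, hG]
    rfl

theorem full_house_pair_changed : Claim_changed_full_house_pair := by
  unfold Claim_changed_full_house_pair; decide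

theorem full_house_pair_tight : Claim_exact_full_house_pair := by
  intro h b _hdom hD
  obtain ⟨⟨t, htm, p, hpm, hf⟩, hall⟩ := hD
  rw [A_eq, B_eq, if_pos (A_none_of_all_nonpos hall)]
  have htpG : (t, p) ∈ goodPairs h b := mem_goodPairs.mpr hf
  rcases hGP : goodPairs h b with _ | ⟨c, rest⟩
  · rw [hGP] at htpG; simp at htpG
  · rw [List.foldl_cons]
    have hini : optUpd none c = some c := rfl
    rw [hini, foldl_optUpd_some]
    simp
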